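-- pv_equiv track=rewrite | github.com/qj/advent-of-code-2020 | day12/solution.py | rotate_waypoint_clockwise
-- ===== SOURCE A (Python) =====
-- def rotate_waypoint_clockwise(direction, degrees):
--     degrees = degrees % 360
--     cur_direction = direction
--     for _ in range(degrees // 90):
--         n, e = cur_direction
--         if n >= 0 and e >= 0:
--             cur_direction = (-cur_direction[1], cur_direction[0])
--         elif n < 0 and e > 0:
--             cur_direction = (-cur_direction[1], cur_direction[0])
--         elif n < 0 and e < 0:
--             cur_direction = (abs(cur_direction[1]), cur_direction[0])
--         else:
--             cur_direction = (abs(cur_direction[1]), cur_direction[0])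
--     return cur_direction
-- ===== SOURCE B (Python) =====
-- def rotate_waypoint_clockwise(direction, degrees):
--     turns = (degrees % 360) // 90
--     if turns == 0:
--         return direction
--     n, e = direction
--     if turns == 1:
--         return (-e, n)
--     if turns == 2:
--         return (-n, -e)
--     return (e, -n)
-- ===== Notes on version B (the rewrite author's own statement) =====
-- stated objective: simpler
-- what changed: Replaces A's 0-3-iteration loop (whose four sign-case branches all reduce to (n,e)->(-e,n)) with a direct closed-form case selection on turns = (degrees % 360) // 90.
import Mathlib
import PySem

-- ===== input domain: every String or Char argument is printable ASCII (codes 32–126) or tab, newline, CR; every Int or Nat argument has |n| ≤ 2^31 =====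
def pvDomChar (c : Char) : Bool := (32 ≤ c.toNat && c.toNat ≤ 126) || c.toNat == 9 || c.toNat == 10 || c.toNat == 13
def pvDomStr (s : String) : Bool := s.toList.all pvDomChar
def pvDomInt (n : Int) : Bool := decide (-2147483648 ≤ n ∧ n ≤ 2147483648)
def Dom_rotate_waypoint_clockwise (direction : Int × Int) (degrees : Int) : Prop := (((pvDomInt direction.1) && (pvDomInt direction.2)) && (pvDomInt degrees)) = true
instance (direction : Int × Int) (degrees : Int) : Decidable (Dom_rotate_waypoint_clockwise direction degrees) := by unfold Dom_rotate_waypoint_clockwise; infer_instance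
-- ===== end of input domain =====

-- B replaces A's sign-case loop (≤3 iterations) with a closed-form case selection on turns = (degrees % 360) // 90; objective: simpler.


-- ===== PORT A =====
-- step of A's loop body: one clockwise quarter-turn, with A's four sign branches
def pvStepA (cur : Int × Int) : Int × Int :=
  let n := cur.1
  let e := cur.2
  if n ≥ 0 ∧ e ≥ 0 then (-cur.2, cur.1)
  else if n < 0 ∧ e > 0 then (-cur.2, cur.1)
  else if n < 0 ∧ e < 0 then (|cur.2|, cur.1)
  else (|cur.2|, cur.1)

def rotate_waypoint_clockwise (direction : Int × Int) (degrees : Int) : Int × Int :=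
  let degrees' := PySem.Int.mod degrees 360
  (PySem.List.pyRange 0 (PySem.Int.floordiv degrees' 90) 1).foldl
    (fun cur _ => pvStepA cur) direction

-- ===== PORT B =====
def rotate_waypoint_clockwise_alt (direction : Int × Int) (degrees : Int) : Int × Int :=
  let turns := PySem.Int.floordiv (PySem.Int.mod degrees 360) 90
  if turns = 0 then direction
  else
    let n := direction.1
    let e := direction.2
    if turns = 1 then (-e, n)
    else if turns = 2 then (-n, -e)
    else (e, -n)

-- ===== PRECONDITION & SPEC =====
def Spec_rotate_waypoint_clockwise (direction : Int × Int) (degrees : Int) (out : Int × Int) : Prop := out = rotate_waypoint_clockwise_alt direction degrees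
instance (direction : Int × Int) (degrees : Int) (out : Int × Int) : Decidable (Spec_rotate_waypoint_clockwise direction degrees out) := by unfold Spec_rotate_waypoint_clockwise; infer_instance

-- ===== CLAIM (what is proved, stated in full; the proofs are below) =====
def Claim_equal_rotate_waypoint_clockwise : Prop := ∀ (direction : Int × Int) (degrees : Int), Dom_rotate_waypoint_clockwise direction degrees → Spec_rotate_waypoint_clockwise direction degrees (rotate_waypoint_clockwise direction degrees)

-- ===== LEMMAS AND PROOFS =====

-- ===== VERDICT (by name: the statement is the Claim_ definition above) =====
-- every branch of A's step is the quarter-turn (n,e) ↦ (-e,n)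
theorem pvStepA_eq (cur : Int × Int) : pvStepA cur = (-cur.2, cur.1) := by
  unfold pvStepA
  dsimp only
  split_ifs with h1 h2 h3 <;> simp_all <;> try omega

theorem pvTurns_cases (degrees : Int) :
    PySem.Int.floordiv (PySem.Int.mod degrees 360) 90 = 0 ∨
    PySem.Int.floordiv (PySem.Int.mod degrees 360) 90 = 1 ∨
    PySem.Int.floordiv (PySem.Int.mod degrees 360) 90 = 2 ∨
    PySem.Int.floordiv (PySem.Int.mod degrees 360) 90 = 3 := by
  have h : 0 ≤ PySem.Int.mod degrees 360 ∧ PySem.Int.mod degrees 360 < 360 := by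
    unfold PySem.Int.mod
    constructor
    · exact Int.fmod_nonneg_of_pos degrees (show (0:Int) < 360 by norm_num)
    · exact Int.fmod_lt_of_pos degrees (show (0:Int) < 360 by norm_num)
  unfold PySem.Int.floordiv
  rw [Int.fdiv_eq_ediv]
  omega

theorem rotate_waypoint_clockwise_spec : Claim_equal_rotate_waypoint_clockwise := by
  intro direction degrees _
  unfold Spec_rotate_waypoint_clockwise rotate_waypoint_clockwise rotate_waypoint_clockwise_alt
  rcases pvTurns_cases degrees with h | h | h | h <;>
    simp only [h] <;>
    simp [PySem.List.pyRange, pvStepA_eq, List.range_succ, List.foldl]
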